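-- pv_equiv track=rewrite | github.com/VinylStage/horror-story-generator | seed_integration.py | format_seed_for_system_prompt
-- ===== SOURCE A (Python) =====
-- from typing import Dict, Any, List, Optional
--
-- def format_seed_for_system_prompt(context: Optional[Dict[str, Any]]) -> str:
--     """
--     Format seed context as a system prompt section.
--
--     Args:
--         context: Seed context from get_seed_context_for_prompt
--
--     Returns:
--         Formatted string for insertion into system prompt
--     """
--     if not context:
--         return ""
--
--     lines = [
--         "",
--         "## Story Seed (thematic inspiration)",
--         "",
--     ]
--
--     themes = context.get("key_themes", [])
--     if themes:
--         lines.append("**Core themes to explore:**")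
--         for theme in themes:
--             lines.append(f"- {theme}")
--         lines.append("")
--
--     atmosphere = context.get("atmosphere_tags", [])
--     if atmosphere:
--         lines.append("**Atmosphere:**")
--         lines.append(f"{', '.join(atmosphere)}")
--         lines.append("")
--
--     hooks = context.get("suggested_hooks", [])
--     if hooks:
--         lines.append("**Possible story hooks:**")
--         for hook in hooks:
--             lines.append(f"- {hook}")
--         lines.append("")
--
--     cultural = context.get("cultural_elements", [])
--     if cultural:
--         lines.append("**Cultural elements:**")
--         for elem in cultural:
--             lines.append(f"- {elem}")
--         lines.append("")
--
--     lines.append("*These are seeds to inspire your writing. "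
--                  "Develop them naturally into your horror narrative.*")
--
--     return "\n".join(lines)
-- ===== SOURCE B (Python) =====
-- def format_seed_for_system_prompt(context):
--     """Recursive back-to-front build: concatenates section blocks directly as
--     strings (no line list, no final join)."""
--     if not context:
--         return ""
--
--     SPECS = [
--         ("key_themes", "**Core themes to explore:**", False),
--         ("atmosphere_tags", "**Atmosphere:**", True),
--         ("suggested_hooks", "**Possible story hooks:**", False),
--         ("cultural_elements", "**Cultural elements:**", False),
--     ]
--
--     def render(i):
--         if i == len(SPECS):
--             return ("*These are seeds to inspire your writing. "
--                     "Develop them naturally into your horror narrative.*")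
--         key, header, inline = SPECS[i]
--         tail = render(i + 1)
--         items = context.get(key, [])
--         if not items:
--             return tail
--         body = ", ".join(items) if inline else "- " + "\n- ".join(items)
--         return header + "\n" + body + "\n\n" + tail
--
--     return "\n## Story Seed (thematic inspiration)\n\n" + render(0)
-- ===== Notes on version B (the rewrite author's own statement) =====
-- stated objective: alternative
-- what changed: Replaces A's accumulate-lines-then-'\n'.join pipeline with a back-to-front recursion over a section spec list that concatenates each section's block string (header + body + blank line) directly onto the already-rendered tail, the bullet body built as one '\n- '.join instead of a per-item loop.
import Mathlib
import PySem

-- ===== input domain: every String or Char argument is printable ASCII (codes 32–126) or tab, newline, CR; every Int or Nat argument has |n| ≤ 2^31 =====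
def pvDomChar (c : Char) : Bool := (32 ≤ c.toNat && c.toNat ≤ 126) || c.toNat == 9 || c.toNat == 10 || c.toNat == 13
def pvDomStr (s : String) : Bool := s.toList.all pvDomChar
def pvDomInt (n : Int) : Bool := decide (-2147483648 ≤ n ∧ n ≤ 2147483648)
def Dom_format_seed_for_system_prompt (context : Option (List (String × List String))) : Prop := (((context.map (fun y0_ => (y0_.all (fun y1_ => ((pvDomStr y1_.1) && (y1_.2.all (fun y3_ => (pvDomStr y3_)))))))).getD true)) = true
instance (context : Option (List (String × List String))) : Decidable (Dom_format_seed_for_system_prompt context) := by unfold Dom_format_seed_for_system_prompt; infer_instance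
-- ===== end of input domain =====

-- B replaces A's accumulate-lines-then-join pipeline with a back-to-front recursion over a
-- section spec list that concatenates each section's block string directly onto the rendered
-- tail (objective: alternative); same return value everywhere.


-- ===== PORT A =====
def format_seed_for_system_prompt (context : Option (List (String × List String))) : String :=
  match context with
  | none => ""
  | some ctx =>
    if ctx = [] then "" else
    let lines : List String := ["", "## Story Seed (thematic inspiration)", ""]
    let themes := PySem.Dict.getD (PySem.Dict.mk ctx) "key_themes" []
    let lines := if themes ≠ [] then
        (themes.foldl (fun ls t => ls ++ ["- " ++ t])
          (lines ++ ["**Core themes to explore:**"])) ++ [""]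
      else lines
    let atmosphere := PySem.Dict.getD (PySem.Dict.mk ctx) "atmosphere_tags" []
    let lines := if atmosphere ≠ [] then
        lines ++ ["**Atmosphere:**", PySem.Str.join ", " atmosphere, ""]
      else lines
    let hooks := PySem.Dict.getD (PySem.Dict.mk ctx) "suggested_hooks" []
    let lines := if hooks ≠ [] then
        (hooks.foldl (fun ls h => ls ++ ["- " ++ h])
          (lines ++ ["**Possible story hooks:**"])) ++ [""]
      else lines
    let cultural := PySem.Dict.getD (PySem.Dict.mk ctx) "cultural_elements" []
    let lines := if cultural ≠ [] then
        (cultural.foldl (fun ls e => ls ++ ["- " ++ e])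
          (lines ++ ["**Cultural elements:**"])) ++ [""]
      else lines
    PySem.Str.join "\n" (lines ++ ["*These are seeds to inspire your writing. Develop them naturally into your horror narrative.*"])

-- ===== PORT B =====
-- the section spec table: (context key, header, inline?) in the original order
def pvSpecs : List (String × String × Bool) :=
  [("key_themes", "**Core themes to explore:**", false),
   ("atmosphere_tags", "**Atmosphere:**", true),
   ("suggested_hooks", "**Possible story hooks:**", false),
   ("cultural_elements", "**Cultural elements:**", false)]

-- render(i): build the string from spec i to the end, back to front
def pvRender (ctx : List (String × List String)) : List (String × String × Bool) → String
  | [] => "*These are seeds to inspire your writing. Develop them naturally into your horror narrative.*"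
  | (key, header, inline) :: rest =>
    let tail := pvRender ctx rest
    let items := PySem.Dict.getD (PySem.Dict.mk ctx) key []
    if items = [] then tail
    else header ++ "\n" ++
      (if inline then PySem.Str.join ", " items else "- " ++ PySem.Str.join "\n- " items)
      ++ "\n\n" ++ tail

def format_seed_for_system_prompt_alt (context : Option (List (String × List String))) : String :=
  match context with
  | none => ""
  | some ctx =>
    if ctx = [] then "" else
    "\n## Story Seed (thematic inspiration)\n\n" ++ pvRender ctx pvSpecs

-- ===== PRECONDITION & SPEC =====
def Spec_format_seed_for_system_prompt (context : Option (List (String × List String))) (out : String) : Prop := out = format_seed_for_system_prompt_alt context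
instance (context : Option (List (String × List String))) (out : String) : Decidable (Spec_format_seed_for_system_prompt context out) := by unfold Spec_format_seed_for_system_prompt; infer_instance

-- ===== CLAIM =====
def Claim_equal_format_seed_for_system_prompt : Prop := ∀ (context : Option (List (String × List String))), Dom_format_seed_for_system_prompt context → Spec_format_seed_for_system_prompt context (format_seed_for_system_prompt context)

-- ===== LEMMAS AND PROOFS =====

-- "g xs t": the string obtained by writing each line of xs followed by '\n', then t
def pvG (xs : List String) (t : String) : String :=
  xs.foldr (fun l acc => l ++ "\n" ++ acc) t

theorem pvJoin_cons (sep x : String) (xs : List String) (h : xs ≠ []) :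
    PySem.Str.join sep (x :: xs) = x ++ sep ++ PySem.Str.join sep xs := by
  cases xs with
  | nil => exact absurd rfl h
  | cons y ys =>
    apply String.toList_injective
    simp [PySem.Str.join, PySem.Chars.join_cons_cons]

theorem pvJoin_singleton (sep x : String) : PySem.Str.join sep [x] = x := by
  apply String.toList_injective
  simp [PySem.Str.join, PySem.Chars.join, List.intercalate]

theorem pvJoin_eq_pvG (xs : List String) (t : String) :
    PySem.Str.join "\n" (xs ++ [t]) = pvG xs t := by
  induction xs with
  | nil => rw [List.nil_append, pvJoin_singleton]; rfl
  | cons x xs ih =>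
    rw [List.cons_append, pvJoin_cons "\n" x (xs ++ [t]) (by simp), ih]
    rfl

theorem pvG_append (xs ys : List String) (t : String) :
    pvG (xs ++ ys) t = pvG xs (pvG ys t) := by
  simp [pvG, List.foldr_append]

theorem pvG_bullets (items : List String) (h : items ≠ []) (t : String) :
    pvG (items.map (fun i => "- " ++ i)) t
      = "- " ++ PySem.Str.join "\n- " items ++ "\n" ++ t := by
  induction items with
  | nil => exact absurd rfl h
  | cons a rest ih =>
    cases rest with
    | nil =>
      rw [pvJoin_singleton]
      apply String.toList_injective
      simp [pvG]
    | cons b rs =>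
      have hG : pvG (List.map (fun i => "- " ++ i) (a :: b :: rs)) t
          = ("- " ++ a) ++ "\n" ++ pvG (List.map (fun i => "- " ++ i) (b :: rs)) t := rfl
      rw [hG, ih (by simp), pvJoin_cons "\n- " a (b :: rs) (by simp)]
      apply String.toList_injective
      simp

theorem pvFlatten_singleton_map (f : String → String) (items : List String) :
    (items.map (fun x => [f x])).flatten = items.map f := by
  induction items <;> simp_all

-- A's section folds rewritten as "prefix ++ optional block"
theorem pvStep_bullets (pre : List String) (items : List String) (header : String) :
    (if items ≠ [] then (items.foldl (fun ls t => ls ++ ["- " ++ t]) (pre ++ [header])) ++ [""] else pre)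
      = pre ++ (if items = [] then [] else [header] ++ items.map (fun i => "- " ++ i) ++ [""]) := by
  by_cases h : items = [] <;>
    simp [h, pvFlatten_singleton_map]

theorem pvStep_inline (pre : List String) (items : List String) (header : String) :
    (if items ≠ [] then pre ++ [header, PySem.Str.join ", " items, ""] else pre)
      = pre ++ (if items = [] then [] else [header, PySem.Str.join ", " items, ""]) := by
  by_cases h : items = [] <;> simp [h]

theorem pvBlock_bullets (items : List String) (header t : String) :
    pvG (if items = [] then [] else [header] ++ items.map (fun i => "- " ++ i) ++ [""]) t
      = if items = [] then t
        else header ++ "\n" ++ ("- " ++ PySem.Str.join "\n- " items) ++ "\n\n" ++ t := by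
  by_cases h : items = []
  · simp [h, pvG]
  · simp only [h, if_false]
    rw [pvG_append, pvG_append, pvG_bullets items h]
    apply String.toList_injective
    simp [pvG]

theorem pvBlock_inline (items : List String) (header t : String) :
    pvG (if items = [] then [] else [header, PySem.Str.join ", " items, ""]) t
      = if items = [] then t
        else header ++ "\n" ++ PySem.Str.join ", " items ++ "\n\n" ++ t := by
  by_cases h : items = []
  · simp [h, pvG]
  · apply String.toList_injective
    simp [h, pvG]

-- ===== VERDICT =====
theorem format_seed_for_system_prompt_spec : Claim_equal_format_seed_for_system_prompt := by
  intro context _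
  unfold Spec_format_seed_for_system_prompt
  cases context with
  | none => rfl
  | some ctx =>
    by_cases hc : ctx = []
    · simp [format_seed_for_system_prompt, format_seed_for_system_prompt_alt, hc]
    · simp only [format_seed_for_system_prompt, format_seed_for_system_prompt_alt, hc, if_false]
      simp only [pvStep_bullets, pvStep_inline]
      rw [pvJoin_eq_pvG]
      simp only [pvG_append]
      rw [pvBlock_bullets, pvBlock_inline, pvBlock_bullets, pvBlock_bullets]
      simp only [pvRender, pvSpecs]
      apply String.toList_injective
      by_cases h1 : PySem.Dict.getD (PySem.Dict.mk ctx) "key_themes" ([] : List String) = [] <;>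
        by_cases h2 : PySem.Dict.getD (PySem.Dict.mk ctx) "atmosphere_tags" ([] : List String) = [] <;>
        by_cases h3 : PySem.Dict.getD (PySem.Dict.mk ctx) "suggested_hooks" ([] : List String) = [] <;>
        by_cases h4 : PySem.Dict.getD (PySem.Dict.mk ctx) "cultural_elements" ([] : List String) = [] <;>
        simp [h1, h2, h3, h4, pvG]
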